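-- pv_equiv track=rewrite | github.com/Nitinnn1403/synapse | backend/core/document_processor/chunker.py | _get_page_number
-- ===== SOURCE A (Python) =====
-- def _get_page_number(char_offset: int, page_numbers: dict[int, int] | None) -> int | None:
--     if not page_numbers:
--         return None
--     # Find the page number for the given character offset
--     page = None
--     for offset, pn in sorted(page_numbers.items()):
--         if offset <= char_offset:
--             page = pn
--         else:
--             break
--     return page
-- ===== SOURCE B (Python) =====
-- def _get_page_number(char_offset: int, page_numbers: dict[int, int] | None) -> int | None:
--     # Single linear pass: track the largest offset <= char_offset and its page; no sort.
--     if not page_numbers: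
--         return None
--     best = None
--     page = None
--     for offset, pn in page_numbers.items():
--         if offset <= char_offset and (best is None or best < offset):
--             best = offset
--             page = pn
--     return page
-- ===== Notes on version B (the rewrite author's own statement) =====
-- stated objective: faster
-- what changed: Replaced sort-then-scan-with-break by a single linear pass over the dict items that tracks the maximum offset <= char_offset and its page number.
import Mathlib
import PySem

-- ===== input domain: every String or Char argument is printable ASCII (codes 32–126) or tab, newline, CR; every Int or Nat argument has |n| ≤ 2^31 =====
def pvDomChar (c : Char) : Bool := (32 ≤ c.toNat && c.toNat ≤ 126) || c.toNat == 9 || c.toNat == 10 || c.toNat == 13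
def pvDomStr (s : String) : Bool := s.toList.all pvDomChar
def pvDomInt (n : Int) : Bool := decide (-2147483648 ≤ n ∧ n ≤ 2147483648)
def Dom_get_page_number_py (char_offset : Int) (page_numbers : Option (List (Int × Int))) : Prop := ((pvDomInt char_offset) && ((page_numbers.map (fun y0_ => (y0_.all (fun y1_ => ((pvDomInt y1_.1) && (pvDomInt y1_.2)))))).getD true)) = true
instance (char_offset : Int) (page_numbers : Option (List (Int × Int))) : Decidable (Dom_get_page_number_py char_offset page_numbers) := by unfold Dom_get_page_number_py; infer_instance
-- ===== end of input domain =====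

-- B replaces A's sort-then-scan (with early break) by a single linear pass tracking the
-- largest offset ≤ char_offset and its page number.


-- ===== PORT A =====
-- 'for offset, pn in sorted(...): if offset <= char_offset: page = pn else: break'
def pvLoopA (c : Int) : List (Int × Int) → Option Int → Option Int
  | [], page => page
  | (k, v) :: t, page => if k ≤ c then pvLoopA c t (some v) else page

-- A dict's keys are unique, so Python's lexicographic sort of its items coincides with
-- sorting the items by key; the sort is ported with key = Prod.fst.
def get_page_number_py (char_offset : Int) (page_numbers : Option (List (Int × Int))) : Option Int :=
  match page_numbers with
  | none => none
  | some l =>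
    let d := PySem.Dict.ofList l
    if d.items = [] then none
    else pvLoopA char_offset (PySem.List.sorted d.items (fun p => p.1)) none

-- ===== PORT B =====
-- state = (best, page); update when offset ≤ char_offset and (best is None or best < offset)
def pvStepB (c : Int) (st : Option Int × Option Int) (p : Int × Int) : Option Int × Option Int :=
  if p.1 ≤ c && (match st.1 with | none => true | some b => decide (b < p.1)) then
    (some p.1, some p.2)
  else st

def get_page_number_py_alt (char_offset : Int) (page_numbers : Option (List (Int × Int))) : Option Int :=
  match page_numbers with
  | none => none
  | some l =>
    let d := PySem.Dict.ofList l
    if d.items = [] then none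
    else (d.items.foldl (pvStepB char_offset) (none, none)).2

-- ===== PRECONDITION & SPEC =====
def Spec_get_page_number_py (char_offset : Int) (page_numbers : Option (List (Int × Int))) (out : Option Int) : Prop := out = get_page_number_py_alt char_offset page_numbers
instance (char_offset : Int) (page_numbers : Option (List (Int × Int))) (out : Option Int) : Decidable (Spec_get_page_number_py char_offset page_numbers out) := by unfold Spec_get_page_number_py; infer_instance

-- ===== CLAIM (what is proved, stated in full; the proofs are below) =====
def Claim_equal_get_page_number_py : Prop := ∀ (char_offset : Int) (page_numbers : Option (List (Int × Int))), Dom_get_page_number_py char_offset page_numbers → Spec_get_page_number_py char_offset page_numbers (get_page_number_py char_offset page_numbers)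

-- ===== LEMMAS AND PROOFS =====

-- stepB applications at distinct keys commute
theorem pvStepB_comm (c : Int) (st : Option Int × Option Int) (x y : Int × Int)
    (h : x.1 ≠ y.1) : pvStepB c (pvStepB c st x) y = pvStepB c (pvStepB c st y) x := by
  obtain ⟨b, pg⟩ := st
  obtain ⟨k1, v1⟩ := x
  obtain ⟨k2, v2⟩ := y
  simp only at h
  rcases b with _ | b <;>
    simp only [pvStepB, Bool.and_eq_true, decide_eq_true_eq] <;>
    split_ifs <;> simp_all <;> omega

-- B's fold is invariant under permutation of lists with pairwise-distinct keys
theorem pvFoldB_perm (c : Int) : ∀ {l1 l2 : List (Int × Int)}, l1.Perm l2 →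
    (l1.map Prod.fst).Nodup → ∀ st, l1.foldl (pvStepB c) st = l2.foldl (pvStepB c) st := by
  intro l1 l2 h
  induction h with
  | nil => intro _ _; rfl
  | cons x _ ih =>
      intro hn st
      simp only [List.map_cons, List.nodup_cons] at hn
      simp only [List.foldl_cons]
      exact ih hn.2 _
  | swap x y l =>
      intro hn st
      simp only [List.map_cons, List.nodup_cons, List.mem_cons] at hn
      have hxy : y.1 ≠ x.1 := fun e => hn.1 (Or.inl e)
      simp only [List.foldl_cons, pvStepB_comm c st y x hxy]
  | trans h12 _ ih1 ih2 =>
      intro hn st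
      have hn2 : (_ : List (Int × Int)).map Prod.fst |>.Nodup := (h12.map Prod.fst).nodup_iff.mp hn
      exact (ih1 hn st).trans (ih2 hn2 st)

-- if no element qualifies, B's fold leaves the state unchanged
theorem pvFoldB_noqual (c : Int) : ∀ (l : List (Int × Int)) (st : Option Int × Option Int),
    (∀ p ∈ l, ¬ p.1 ≤ c) → l.foldl (pvStepB c) st = st := by
  intro l
  induction l with
  | nil => intro _ _; rfl
  | cons x t ih =>
      intro st h
      have hx : ¬ x.1 ≤ c := h x (List.mem_cons_self)
      simp only [List.foldl_cons, pvStepB, hx]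
      rw [if_neg (by simp)]
      exact ih st fun p hp => h p (List.mem_cons_of_mem _ hp)

-- on a key-sorted list, B's fold computes A's break-scan
theorem pvFoldB_sorted (c : Int) : ∀ (l : List (Int × Int)) (b pg : Option Int),
    l.Pairwise (fun a b => a.1 < b.1) →
    (∀ p ∈ l, ∀ x, b = some x → x < p.1) →
    (l.foldl (pvStepB c) (b, pg)).2 = pvLoopA c l pg := by
  intro l
  induction l with
  | nil => intro _ _ _ _; rfl
  | cons x t ih =>
      obtain ⟨k, v⟩ := x
      intro b pg hpw hb
      rw [List.pairwise_cons] at hpw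
      by_cases hk : k ≤ c
      · have hfire : pvStepB c (b, pg) (k, v) = (some k, some v) := by
          rcases b with _ | b
          · simp [pvStepB, hk]
          · have : b < k := hb (k, v) List.mem_cons_self b rfl
            simp [pvStepB, hk, this]
        simp only [List.foldl_cons, hfire, pvLoopA, if_pos hk]
        exact ih (some k) (some v) hpw.2
          (fun p hp x hx => by cases hx; exact hpw.1 p hp)
      · have hnof : pvStepB c (b, pg) (k, v) = (b, pg) := by
          simp [pvStepB, hk]
        simp only [List.foldl_cons, hnof, pvLoopA, if_neg hk]
        have : ∀ p ∈ t, ¬ p.1 ≤ c := fun p hp hle =>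
          hk (le_trans (le_of_lt (hpw.1 p hp)) hle)
        rw [pvFoldB_noqual c t (b, pg) this]

-- pairwise ≤ on keys plus distinct keys gives pairwise <
theorem pvPairwise_lt (s : List (Int × Int))
    (h1 : s.Pairwise (fun a b => a.1 ≤ b.1)) (h2 : (s.map Prod.fst).Nodup) :
    s.Pairwise (fun a b => a.1 < b.1) := by
  have h2' : s.Pairwise (fun a b => a.1 ≠ b.1) := List.pairwise_map.mp h2
  exact (h1.and h2').imp (fun h => lt_of_le_of_ne h.1 h.2)

-- ===== VERDICT (by name: the statement is the Claim_ definition above) =====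
theorem get_page_number_py_spec : Claim_equal_get_page_number_py := by
  intro c pns _
  unfold Spec_get_page_number_py get_page_number_py get_page_number_py_alt
  cases pns with
  | none => rfl
  | some l =>
      simp only
      by_cases he : (PySem.Dict.ofList l).items = []
      · simp [he]
      · simp only [if_neg he]
        have hnodup : ((PySem.Dict.ofList l).items.map Prod.fst).Nodup :=
          PySem.Dict.nodup_keys_ofList l
        have hperm := PySem.List.sorted_perm (PySem.Dict.ofList l).items (fun p => p.1) false
        have hnodup' := ((hperm.map Prod.fst).nodup_iff).mpr hnodup
        have hle := PySem.List.sorted_pairwise (PySem.Dict.ofList l).items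
          (fun p => p.1)
        have hlt := pvPairwise_lt _ hle hnodup'
        rw [pvFoldB_perm c hperm.symm hnodup (none, none)]
        exact (pvFoldB_sorted c _ none none hlt (fun _ _ _ h => by cases h)).symm
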